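-- pv_equiv track=rewrite | github.com/Poorviyadav08/Poorvi_delve_intern | module_1/question_12.py | sum_9
-- ===== SOURCE A (Python) =====
-- def sum_9(user_input):
--     result = []
--     letters = []
--
--     for i in range(len(user_input)):
--         if user_input[i].isalpha():
--             letters.append((i, user_input[i]))
--     for i in range(len(letters)):
--         for j in range(i + 1, len(letters)):
--             start = letters[i][0]
--             end = letters[j][0]
--             sum = 0
--             for char in user_input[start + 1:end]:
--                 if char.isdigit():
--                     sum +=int(char)
--             if sum ==9:
--                 result.append(f"{letters[i][1]},{letters[j][1]}")
--     return result
-- ===== SOURCE B (Python) =====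
-- def sum_9(user_input):
--     # prefix sums of digit values: pre[k] = sum of digits in user_input[:k]
--     d = 0
--     pre = [0]
--     for ch in user_input:
--         if ch.isdigit():
--             d += int(ch)
--         pre.append(d)
--     letters = [(i, ch) for i, ch in enumerate(user_input) if ch.isalpha()]
--     result = []
--     for k in range(len(letters)):
--         si, a = letters[k]
--         base = pre[si + 1]
--         for ej, b in letters[k + 1:]:
--             if pre[ej] - base == 9:
--                 result.append(f"{a},{b}")
--     return result
-- ===== Notes on version B (the rewrite author's own statement) =====
-- stated objective: faster
-- what changed: B precomputes one prefix-sum array of digit values so each letter pair's between-digit sum is two O(1) lookups instead of rescanning the slice, and pairs each letter with its tail instead of double indexing.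
import Mathlib
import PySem

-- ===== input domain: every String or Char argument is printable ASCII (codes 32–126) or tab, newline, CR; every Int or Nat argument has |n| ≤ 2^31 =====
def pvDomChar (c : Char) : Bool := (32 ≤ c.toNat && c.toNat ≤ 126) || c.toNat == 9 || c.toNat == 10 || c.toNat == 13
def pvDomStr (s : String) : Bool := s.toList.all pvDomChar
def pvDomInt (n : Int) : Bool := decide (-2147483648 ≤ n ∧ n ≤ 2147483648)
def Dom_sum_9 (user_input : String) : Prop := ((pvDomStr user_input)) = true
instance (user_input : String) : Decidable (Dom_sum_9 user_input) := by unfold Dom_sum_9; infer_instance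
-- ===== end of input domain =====

-- B replaces A's per-pair rescan of the text by one prefix-sum pass over the digits,
-- so each letter pair's between-digit sum becomes two lookups (objective: faster).

-- ===== PORT A =====
-- int(char) under the isdigit guard is ported as the digit value c - '0' (exact on the ASCII domain)
def sum_9 (user_input : String) : List String :=
  let cs := user_input.toList
  let letters := (PySem.List.pyRange 0 (cs.length : Int) 1).foldl
    (fun acc i =>
      if PySem.Chars.isalpha (PySem.List.pyGetD cs i ' ') then
        acc ++ [(i, PySem.List.pyGetD cs i ' ')]
      else acc) []
  (PySem.List.pyRange 0 (letters.length : Int) 1).foldl (fun result i =>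
    (PySem.List.pyRange (i + 1) (letters.length : Int) 1).foldl (fun result j =>
      let start := (PySem.List.pyGetD letters i ((0 : Int), ' ')).1
      let «end» := (PySem.List.pyGetD letters j ((0 : Int), ' ')).1
      let sum := (PySem.List.slice cs (some (start + 1)) (some «end»)).foldl
        (fun s c => if PySem.Chars.isdigit c then s + ((c.toNat : Int) - 48) else s) (0 : Int)
      if sum == 9 then
        result ++ [String.ofList [(PySem.List.pyGetD letters i ((0 : Int), ' ')).2, ',',
                                  (PySem.List.pyGetD letters j ((0 : Int), ' ')).2]]
      else result) result) []

-- ===== PORT B =====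
-- B's 'for k …: for (ej, b) in letters[k+1:]' loop, as structural recursion on letters
def sum9Pairs (pre : List Int) : List (Int × Char) → List String
  | [] => []
  | p :: rest =>
    (rest.filter (fun q => PySem.List.pyGetD pre q.1 0 - PySem.List.pyGetD pre (p.1 + 1) 0 == 9)).map
      (fun q => String.ofList [p.2, ',', q.2]) ++ sum9Pairs pre rest

def sum_9_alt (user_input : String) : List String :=
  let cs := user_input.toList
  let pre := (cs.foldl (fun (st : Int × List Int) c =>
      let d := if PySem.Chars.isdigit c then st.1 + ((c.toNat : Int) - 48) else st.1
      (d, st.2 ++ [d])) ((0 : Int), [(0 : Int)])).2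
  let letters := (PySem.List.enumerate cs).filter (fun p => PySem.Chars.isalpha p.2)
  sum9Pairs pre letters

-- ===== PRECONDITION & SPEC =====
def Spec_sum_9 (user_input : String) (out : List String) : Prop := out = sum_9_alt user_input
instance (user_input : String) (out : List String) : Decidable (Spec_sum_9 user_input out) := by unfold Spec_sum_9; infer_instance

-- ===== CLAIM (what is proved, stated in full; the proofs are below) =====
def Claim_equal_sum_9 : Prop := ∀ (user_input : String), Dom_sum_9 user_input → Spec_sum_9 user_input (sum_9 user_input)

-- ===== LEMMAS AND PROOFS =====

-- digit value of one char, and digit sum of a char list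
def digitVal (c : Char) : Int := if PySem.Chars.isdigit c then (c.toNat : Int) - 48 else 0
def dsum (l : List Char) : Int := (l.map digitVal).sum

lemma dsum_append (l₁ l₂ : List Char) : dsum (l₁ ++ l₂) = dsum l₁ + dsum l₂ := by simp [dsum]

-- generic "pair each element with its tail" recursion
def pairsRec {α β : Type} (h : α → List α → List β) : List α → List β
  | [] => []
  | x :: rest => h x rest ++ pairsRec h rest

-- B's prefix-sum loop produces the digit sums of all prefixes
lemma preFold_snd (cs : List Char) : ∀ (a : Int) (l : List Int),
    (cs.foldl (fun (st : Int × List Int) c =>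
      let d := if PySem.Chars.isdigit c then st.1 + ((c.toNat : Int) - 48) else st.1
      (d, st.2 ++ [d])) (a, l)).2
    = l ++ (List.range cs.length).map (fun k => a + dsum (cs.take (k+1))) := by
  induction cs with
  | nil => simp
  | cons c cs ih =>
    intro a l
    have hd : (if PySem.Chars.isdigit c then a + ((c.toNat : Int) - 48) else a) = a + digitVal c := by
      unfold digitVal; split_ifs <;> omega
    simp only [List.foldl_cons, hd, ih, List.length_cons, List.range_succ_eq_map]
    simp [dsum, add_assoc, List.append_assoc, Function.comp]

lemma pre_getD (cs : List Char) (i : Int) (h0 : 0 ≤ i) (hle : i ≤ (cs.length : Int)) :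
    PySem.List.pyGetD ([(0:Int)] ++ (List.range cs.length).map (fun k => dsum (cs.take (k+1)))) i 0
    = dsum (cs.take i.toNat) := by
  obtain ⟨n, rfl⟩ := Int.eq_ofNat_of_zero_le h0
  rw [PySem.List.pyGetD_natCast]
  cases n with
  | zero => simp [dsum]
  | succ m =>
    have hm : m < cs.length := by exact_mod_cast (by omega : ((m:Int)+1) ≤ (cs.length:Int))
    simp [List.getD, hm]

-- A's inner rescan of user_input[start+1:end] is a difference of two prefix digit sums
lemma slice_dsum (cs : List Char) (si ej : Int) (h0 : 0 ≤ si) (hlt : si < ej)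
    (_hle : ej ≤ (cs.length : Int)) :
    (PySem.List.slice cs (some (si+1)) (some ej)).foldl
      (fun s c => if PySem.Chars.isdigit c then s + ((c.toNat : Int) - 48) else s) (0 : Int)
    = dsum (cs.take ej.toNat) - dsum (cs.take (si+1).toNat) := by
  have h1 : (0:Int) ≤ si + 1 := by omega
  rw [PySem.List.foldl_congr_mem _ _ (fun s c => s + digitVal c) _
      (by intro acc x _; beta_reduce; unfold digitVal; split_ifs <;> omega),
    PySem.List.foldl_add, PySem.List.slice_toNat cs h1 (by omega)]
  have ha : (si + 1).toNat ≤ ej.toNat := by omega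
  have hsplit : cs.take ej.toNat
      = cs.take (si+1).toNat ++ (cs.drop (si+1).toNat).take (ej.toNat - (si+1).toNat) := by
    rw [← List.take_add]; congr 1; omega
  rw [hsplit, dsum_append]
  simp only [dsum, zero_add]
  ring

-- A's first loop builds exactly the filtered enumeration B uses
lemma letters_eq (cs : List Char) :
    (PySem.List.pyRange 0 (cs.length : Int) 1).foldl
      (fun acc i =>
        if PySem.Chars.isalpha (PySem.List.pyGetD cs i ' ') then
          acc ++ [(i, PySem.List.pyGetD cs i ' ')]
        else acc) []
    = (PySem.List.enumerate cs).filter (fun p => PySem.Chars.isalpha p.2) := by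
  rw [PySem.List.foldl_append_if (fun i => PySem.Chars.isalpha (PySem.List.pyGetD cs i ' '))
      (fun i => (i, PySem.List.pyGetD cs i ' '))]
  rw [PySem.List.enumerate_eq_map_pyRange cs ' ', List.filter_map]
  simp only [PySem.List.len_eq, Function.comp_def, List.nil_append]

-- indexed flatMap over a list = pairing each element with its tail
lemma flatMap_range_pairs {α β : Type} (d : α) (h : α → List α → List β) :
    ∀ L : List α, (List.range L.length).flatMap (fun k => h (L.getD k d) (L.drop (k+1))) = pairsRec h L := by
  intro L
  induction L with
  | nil => simp [pairsRec]
  | cons x rest ih =>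
    simp only [List.length_cons, List.range_succ_eq_map, List.flatMap_cons, List.flatMap_map]
    simp only [pairsRec, ← ih]
    simp

-- A's nested index loops collapse to the pairsRec skeleton
lemma A_pairs (L : List (Int × Char)) (dd : Int × Char)
    (C : (Int × Char) → (Int × Char) → Bool) (O : (Int × Char) → (Int × Char) → String) :
    (PySem.List.pyRange 0 (L.length : Int) 1).foldl (fun result i =>
      (PySem.List.pyRange (i + 1) (L.length : Int) 1).foldl (fun result j =>
        if C (PySem.List.pyGetD L i dd) (PySem.List.pyGetD L j dd) then
          result ++ [O (PySem.List.pyGetD L i dd) (PySem.List.pyGetD L j dd)]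
        else result) result) []
    = pairsRec (fun x rest => (rest.filter (C x)).map (O x)) L := by
  have hin : ∀ (result : List String) (i : Int),
      (PySem.List.pyRange (i + 1) (L.length : Int) 1).foldl (fun result j =>
        if C (PySem.List.pyGetD L i dd) (PySem.List.pyGetD L j dd) then
          result ++ [O (PySem.List.pyGetD L i dd) (PySem.List.pyGetD L j dd)]
        else result) result
      = result ++ ((PySem.List.pyRange (i + 1) (L.length : Int) 1).filter
          (fun j => C (PySem.List.pyGetD L i dd) (PySem.List.pyGetD L j dd))).map
          (fun j => O (PySem.List.pyGetD L i dd) (PySem.List.pyGetD L j dd)) := by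
    intro result i
    exact PySem.List.foldl_append_if _ _ _ _
  rw [PySem.List.foldl_congr_mem _ _
      (fun result i => result ++ ((PySem.List.pyRange (i + 1) (L.length : Int) 1).filter
          (fun j => C (PySem.List.pyGetD L i dd) (PySem.List.pyGetD L j dd))).map
          (fun j => O (PySem.List.pyGetD L i dd) (PySem.List.pyGetD L j dd))) _
      (by intro acc i _; exact hin acc i),
    PySem.List.foldl_append_eq_flatMap]
  rw [List.nil_append]
  rw [PySem.List.pyRange_zero_nat, List.flatMap_map]
  rw [← flatMap_range_pairs dd (fun x rest => (rest.filter (C x)).map (O x)) L]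
  apply List.flatMap_congr
  intro k hk
  rw [List.mem_range] at hk
  rw [PySem.List.pyGetD_natCast]
  have hcast : ((k : Int) + 1) = (((k + 1 : Nat)) : Int) := by push_cast; ring
  have hmap := PySem.List.map_pyGetD_pyRange L dd (a := (((k + 1 : Nat)) : Int)) (by positivity)
  rw [PySem.List.len_eq, Int.toNat_natCast] at hmap
  rw [hcast, ← hmap, List.filter_map, List.map_map]
  rfl

-- two pairsRec skeletons agree when the pair conditions agree on ordered pairs of the list
lemma pairsRec_filter_congr {α β : Type} (R : α → α → Prop) (cA cB : α → α → Bool) (f : α → α → β) :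
    ∀ L : List α, L.Pairwise R → (∀ x y, x ∈ L → y ∈ L → R x y → cA x y = cB x y) →
    pairsRec (fun x rest => (rest.filter (cA x)).map (f x)) L
    = pairsRec (fun x rest => (rest.filter (cB x)).map (f x)) L := by
  intro L
  induction L with
  | nil => intro _ _; rfl
  | cons x rest ih =>
    intro hp hc
    rw [List.pairwise_cons] at hp
    simp only [pairsRec]
    rw [List.filter_congr (fun y hy => hc x y (List.mem_cons_self) (List.mem_cons_of_mem _ hy) (hp.1 y hy)),
      ih hp.2 (fun a b ha hb hr => hc a b (List.mem_cons_of_mem _ ha) (List.mem_cons_of_mem _ hb) hr)]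

lemma letters_mem_bounds (cs : List Char) (p : Int × Char)
    (hp : p ∈ (PySem.List.enumerate cs).filter (fun q => PySem.Chars.isalpha q.2)) :
    0 ≤ p.1 ∧ p.1 < (cs.length : Int) := by
  have := (List.mem_filter.1 hp).1
  rw [PySem.List.mem_enumerate_iff] at this
  obtain ⟨k, hk, rfl⟩ := this
  constructor <;> simp <;> omega

lemma letters_pairwise (cs : List Char) :
    ((PySem.List.enumerate cs).filter (fun q => PySem.Chars.isalpha q.2)).Pairwise
      (fun p q => p.1 < q.1) :=
  (PySem.List.pairwise_lt_enumerate cs 0).filter _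

-- B's recursion as a pairsRec skeleton
lemma sum9Pairs_eq (pre : List Int) : ∀ L : List (Int × Char),
    sum9Pairs pre L = pairsRec (fun x rest =>
      (rest.filter (fun q => PySem.List.pyGetD pre q.1 0 - PySem.List.pyGetD pre (x.1 + 1) 0 == 9)).map
        (fun q => String.ofList [x.2, ',', q.2])) L := by
  intro L
  induction L with
  | nil => rfl
  | cons x rest ih => simp only [sum9Pairs, pairsRec, ih]

-- ===== VERDICT (by name: the statement is the Claim_ definition above) =====
theorem sum_9_spec : Claim_equal_sum_9 := by
  intro s _
  unfold Spec_sum_9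
  have hA : sum_9 s = pairsRec (fun x rest =>
      (rest.filter (fun y =>
        (PySem.List.slice s.toList (some (x.1 + 1)) (some y.1)).foldl
          (fun t c => if PySem.Chars.isdigit c then t + ((c.toNat : Int) - 48) else t) (0 : Int) == 9)).map
        (fun y => String.ofList [x.2, ',', y.2]))
      ((PySem.List.enumerate s.toList).filter (fun p => PySem.Chars.isalpha p.2)) := by
    show (let cs := s.toList
      let letters := (PySem.List.pyRange 0 (cs.length : Int) 1).foldl
        (fun acc i =>
          if PySem.Chars.isalpha (PySem.List.pyGetD cs i ' ') then
            acc ++ [(i, PySem.List.pyGetD cs i ' ')]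
          else acc) []
      (PySem.List.pyRange 0 (letters.length : Int) 1).foldl (fun result i =>
        (PySem.List.pyRange (i + 1) (letters.length : Int) 1).foldl (fun result j =>
          let start := (PySem.List.pyGetD letters i ((0 : Int), ' ')).1
          let «end» := (PySem.List.pyGetD letters j ((0 : Int), ' ')).1
          let sum := (PySem.List.slice cs (some (start + 1)) (some «end»)).foldl
            (fun t c => if PySem.Chars.isdigit c then t + ((c.toNat : Int) - 48) else t) (0 : Int)
          if sum == 9 then
            result ++ [String.ofList [(PySem.List.pyGetD letters i ((0 : Int), ' ')).2, ',',
                                      (PySem.List.pyGetD letters j ((0 : Int), ' ')).2]]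
          else result) result) []) = _
    simp only [letters_eq]
    exact A_pairs _ ((0 : Int), ' ')
      (fun x y => ((PySem.List.slice s.toList (some (x.1 + 1)) (some y.1)).foldl
          (fun t c => if PySem.Chars.isdigit c then t + ((c.toNat : Int) - 48) else t) (0 : Int) == 9))
      (fun x y => String.ofList [x.2, ',', y.2])
  have hpre : ((s.toList.foldl (fun (st : Int × List Int) c =>
      let d := if PySem.Chars.isdigit c then st.1 + ((c.toNat : Int) - 48) else st.1
      (d, st.2 ++ [d])) ((0 : Int), [(0 : Int)])).2)
      = [(0:Int)] ++ (List.range s.toList.length).map (fun k => dsum (s.toList.take (k+1))) := by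
    rw [preFold_snd]; simp
  have hB : sum_9_alt s = pairsRec (fun x rest =>
      (rest.filter (fun q =>
        PySem.List.pyGetD ([(0:Int)] ++ (List.range s.toList.length).map (fun k => dsum (s.toList.take (k+1)))) q.1 0
        - PySem.List.pyGetD ([(0:Int)] ++ (List.range s.toList.length).map (fun k => dsum (s.toList.take (k+1)))) (x.1 + 1) 0 == 9)).map
        (fun q => String.ofList [x.2, ',', q.2]))
      ((PySem.List.enumerate s.toList).filter (fun p => PySem.Chars.isalpha p.2)) := by
    show (let cs := s.toList
      let pre := (cs.foldl (fun (st : Int × List Int) c =>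
          let d := if PySem.Chars.isdigit c then st.1 + ((c.toNat : Int) - 48) else st.1
          (d, st.2 ++ [d])) ((0 : Int), [(0 : Int)])).2
      let letters := (PySem.List.enumerate cs).filter (fun p => PySem.Chars.isalpha p.2)
      sum9Pairs pre letters) = _
    simp only [hpre]
    exact sum9Pairs_eq _ _
  rw [hA, hB]
  apply pairsRec_filter_congr (fun p q => p.1 < q.1)
  · exact letters_pairwise s.toList
  · intro x y hx hy hr
    obtain ⟨hx0, hxlt⟩ := letters_mem_bounds s.toList x hx
    obtain ⟨hy0, hylt⟩ := letters_mem_bounds s.toList y hy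
    rw [slice_dsum s.toList x.1 y.1 hx0 hr (by omega),
      pre_getD s.toList y.1 hy0 (by omega),
      pre_getD s.toList (x.1 + 1) (by omega) (by omega)]
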